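-- pv_equiv track=rewrite | github.com/seankmartin/NeuralConnections | Code/neuroconnect/plot_graph.py | get_colours
-- ===== SOURCE A (Python) =====
-- def get_colours(graph_size, start_set, end_set, reachable=None):
--     """Get colours for nodes."""
--     # Setup the colours
--     c = []
--     if reachable is None:
--         reachable = end_set
--     for acc_val in range(graph_size):
--         if acc_val in start_set:
--             c.append("b")
--         elif acc_val in end_set:
--             if acc_val in reachable:
--                 c.append("g")
--             else:
--                 c.append("r")
--         else:
--             c.append("gray")
--     return c
-- ===== SOURCE B (Python) =====
-- def get_colours(graph_size, start_set, end_set, reachable=None):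
--     """Get colours for nodes."""
--     if reachable is None:
--         reachable = end_set
--     c = ["gray"] * graph_size
--     for idx in end_set:
--         if 0 <= idx < graph_size:
--             c[idx] = "g" if idx in reachable else "r"
--     for idx in start_set:
--         if 0 <= idx < graph_size:
--             c[idx] = "b"
--     return c
-- ===== Notes on version B (the rewrite author's own statement) =====
-- stated objective: alternative
-- what changed: B replaces A's per-node membership scans over range(graph_size) with a pre-filled ['gray']*graph_size list overwritten by direct indexed marking passes over end_set then start_set.
import Mathlib
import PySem

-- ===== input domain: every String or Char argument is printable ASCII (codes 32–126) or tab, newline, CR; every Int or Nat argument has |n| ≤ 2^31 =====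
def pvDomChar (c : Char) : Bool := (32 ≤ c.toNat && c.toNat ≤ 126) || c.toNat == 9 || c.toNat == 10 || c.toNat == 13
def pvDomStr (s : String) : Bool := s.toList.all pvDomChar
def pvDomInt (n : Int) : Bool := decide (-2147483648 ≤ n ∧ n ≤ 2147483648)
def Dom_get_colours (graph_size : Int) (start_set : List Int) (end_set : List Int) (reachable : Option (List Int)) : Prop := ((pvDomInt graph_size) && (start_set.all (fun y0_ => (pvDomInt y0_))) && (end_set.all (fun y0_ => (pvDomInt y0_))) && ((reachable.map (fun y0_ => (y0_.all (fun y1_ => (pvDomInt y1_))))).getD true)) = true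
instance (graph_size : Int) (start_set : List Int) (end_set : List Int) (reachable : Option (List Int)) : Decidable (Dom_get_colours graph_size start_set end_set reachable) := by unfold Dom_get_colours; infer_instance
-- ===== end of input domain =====

-- B replaces A's per-node membership scan over range(graph_size) with a gray-filled list
-- overwritten by indexed marking passes over end_set then start_set (alternative decomposition).


-- ===== PORT A =====
def get_colours (graph_size : Int) (start_set : List Int) (end_set : List Int) (reachable : Option (List Int)) : List String :=
  let r := match reachable with
    | none => end_set
    | some rs => rs
  (PySem.List.pyRange 0 graph_size 1).foldl
    (fun c acc_val =>
      if acc_val ∈ start_set then c ++ ["b"]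
      else if acc_val ∈ end_set then
        (if acc_val ∈ r then c ++ ["g"] else c ++ ["r"])
      else c ++ ["gray"]) []

-- ===== PORT B =====
def get_colours_alt (graph_size : Int) (start_set : List Int) (end_set : List Int) (reachable : Option (List Int)) : List String :=
  let r := reachable.getD end_set
  let c0 := List.replicate graph_size.toNat "gray"
  let c1 := end_set.foldl
    (fun c idx =>
      if 0 ≤ idx ∧ idx < graph_size then c.set idx.toNat (if idx ∈ r then "g" else "r") else c) c0
  start_set.foldl
    (fun c idx => if 0 ≤ idx ∧ idx < graph_size then c.set idx.toNat "b" else c) c1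

-- ===== PRECONDITION & SPEC =====
def Spec_get_colours (graph_size : Int) (start_set : List Int) (end_set : List Int) (reachable : Option (List Int)) (out : List String) : Prop := out = get_colours_alt graph_size start_set end_set reachable
instance (graph_size : Int) (start_set : List Int) (end_set : List Int) (reachable : Option (List Int)) (out : List String) : Decidable (Spec_get_colours graph_size start_set end_set reachable out) := by unfold Spec_get_colours; infer_instance

-- ===== CLAIM (what is proved, stated in full; the proofs are below) =====
def Claim_equal_get_colours : Prop := ∀ (graph_size : Int) (start_set : List Int) (end_set : List Int) (reachable : Option (List Int)), Dom_get_colours graph_size start_set end_set reachable → Spec_get_colours graph_size start_set end_set reachable (get_colours graph_size start_set end_set reachable)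

-- ===== LEMMAS AND PROOFS =====

-- a marking pass preserves the length of the colour list
theorem markPass_length (N : Int) (f : Int → String) (xs : List Int) (c : List String) :
    (xs.foldl (fun c idx => if 0 ≤ idx ∧ idx < N then c.set idx.toNat (f idx) else c) c).length
      = c.length := by
  induction xs generalizing c with
  | nil => rfl
  | cons x xs ih =>
      simp only [List.foldl_cons]
      rw [ih]
      split <;> simp

-- element j of a marking pass: f j if j occurred in xs (and is in range), else the old value
theorem markPass_getElem (N : Int) (f : Int → String) (xs : List Int) (cs : List String)
    (hc : (cs.length : Int) = N ⊔ 0) (j : Nat) (hj : j < cs.length)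
    (hj' : j < (xs.foldl (fun c idx => if 0 ≤ idx ∧ idx < N then c.set idx.toNat (f idx) else c) cs).length) :
    (xs.foldl (fun c idx => if 0 ≤ idx ∧ idx < N then c.set idx.toNat (f idx) else c) cs)[j]
      = if (j : Int) ∈ xs then f j else cs[j] := by
  induction xs generalizing cs with
  | nil => simp
  | cons x xs ih =>
      simp only [List.foldl_cons]
      have hlen : (if 0 ≤ x ∧ x < N then cs.set x.toNat (f x) else cs).length = cs.length := by
        split <;> simp
      rw [ih _ (by rw [hlen]; exact hc) (by omega)]
      · by_cases hmem : (j : Int) ∈ xs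
        · simp [hmem, List.mem_cons]
        · by_cases hx : x = (j : Int)
          · have hjN : ((j : Nat) : Int) < N := by omega
            simp [hx, hmem, hjN, List.getElem_set_self]
          · have hmem' : ¬ ((j : Int) ∈ x :: xs) := by
              simp only [List.mem_cons]
              rintro (h | h)
              · exact hx h.symm
              · exact hmem h
            rw [if_neg hmem', if_neg hmem]
            by_cases hg : 0 ≤ x ∧ x < N
            · have hne : x.toNat ≠ j := by omega
              simp [hg, List.getElem_set_ne hne]
            · simp [hg]

-- pyRange 0 graph_size 1 as List.range over graph_size.toNat
theorem pyRange_toNat (gs : Int) :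
    PySem.List.pyRange 0 gs 1 = (List.range gs.toNat).map (fun (k : Nat) => (k : Int)) := by
  rcases le_or_gt 0 gs with h | h
  · have h2 : gs = ((gs.toNat : Nat) : Int) := by omega
    rw [h2, PySem.List.pyRange_zero_natCast, Int.toNat_natCast]
  · have h1 : PySem.List.pyRange 0 gs 1 = [] := by
      simp [PySem.List.pyRange]
      omega
    have h2 : gs.toNat = 0 := by omega
    simp [h1, h2]

-- the colour A assigns to node v
def colourA (start_set end_set r : List Int) (v : Int) : String :=
  if v ∈ start_set then "b"
  else if v ∈ end_set then (if v ∈ r then "g" else "r")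
  else "gray"

-- A's foldl-with-append loop is the map of colourA over the range
theorem getColours_eq_map (graph_size : Int) (start_set end_set r : List Int) :
    (PySem.List.pyRange 0 graph_size 1).foldl
      (fun c acc_val =>
        if acc_val ∈ start_set then c ++ ["b"]
        else if acc_val ∈ end_set then
          (if acc_val ∈ r then c ++ ["g"] else c ++ ["r"])
        else c ++ ["gray"]) []
      = (PySem.List.pyRange 0 graph_size 1).map (colourA start_set end_set r) := by
  have hstep : (fun (c : List String) (acc_val : Int) =>
        if acc_val ∈ start_set then c ++ ["b"]
        else if acc_val ∈ end_set then
          (if acc_val ∈ r then c ++ ["g"] else c ++ ["r"])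
        else c ++ ["gray"])
      = fun c acc_val => c ++ [colourA start_set end_set r acc_val] := by
    funext c v
    unfold colourA
    split_ifs <;> rfl
  rw [hstep, PySem.List.foldl_append_singleton_eq_map]
  simp

-- the two computations agree once the reachable default is resolved to a plain list r
theorem main_core (graph_size : Int) (start_set end_set r : List Int) :
    (PySem.List.pyRange 0 graph_size 1).foldl
      (fun c acc_val =>
        if acc_val ∈ start_set then c ++ ["b"]
        else if acc_val ∈ end_set then
          (if acc_val ∈ r then c ++ ["g"] else c ++ ["r"])
        else c ++ ["gray"]) []
      = start_set.foldl
          (fun c idx => if 0 ≤ idx ∧ idx < graph_size then c.set idx.toNat "b" else c)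
          (end_set.foldl
            (fun c idx => if 0 ≤ idx ∧ idx < graph_size then c.set idx.toNat (if idx ∈ r then "g" else "r") else c)
            (List.replicate graph_size.toNat "gray")) := by
  rw [getColours_eq_map, pyRange_toNat]
  simp only [List.map_map]
  set N := graph_size.toNat with hN
  have hc0len : (List.replicate N "gray").length = N := by simp
  have hlen1 : ∀ (xs : List Int) (f : Int → String) (c : List String),
      (xs.foldl (fun c idx => if 0 ≤ idx ∧ idx < graph_size then c.set idx.toNat (f idx) else c) c).length = c.length :=
    fun xs f c => markPass_length graph_size f xs c
  apply List.ext_getElem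
  · simp [hlen1, hc0len]
  · intro j hj1 hj2
    have hjN : j < N := by simpa using hj1
    have hcast : (((List.replicate N "gray").length : Nat) : Int) = graph_size ⊔ 0 := by
      simp only [List.length_replicate, hN]
      omega
    simp only [List.getElem_map, List.getElem_range]
    have hlen2 : ((end_set.foldl (fun c idx => if 0 ≤ idx ∧ idx < graph_size then c.set idx.toNat (if idx ∈ r then "g" else "r") else c) (List.replicate N "gray")).length : Int) = graph_size ⊔ 0 := by
      rw [hlen1 end_set (fun idx => if idx ∈ r then "g" else "r")]; simpa using hcast
    rw [markPass_getElem graph_size _ start_set _ hlen2 j (by rw [hlen1 end_set (fun idx => if idx ∈ r then "g" else "r")]; simpa using hjN) hj2]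
    rw [markPass_getElem graph_size _ end_set _ hcast j (by simpa using hjN) (by rw [hlen1 end_set (fun idx => if idx ∈ r then "g" else "r")]; simpa using hjN)]
    unfold colourA
    by_cases hs : ((j:Nat) : Int) ∈ start_set
    · simp [hs]
    · by_cases he : ((j:Nat) : Int) ∈ end_set
      · simp [hs, he]
      · simp [hs, he]

-- ===== VERDICT (by name: the statement is the Claim_ definition above) =====
theorem get_colours_spec : Claim_equal_get_colours := by
  intro graph_size start_set end_set reachable _
  unfold Spec_get_colours get_colours get_colours_alt
  cases reachable with
  | none => exact main_core graph_size start_set end_set end_set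
  | some rs => exact main_core graph_size start_set end_set rs
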